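-- pv_equiv track=rewrite | github.com/Mollyaxonai/axonai_vps | generate_report.py | group_variables
-- ===== SOURCE A (Python) =====
-- def group_variables(columns):
--
--     groups = {
--         "Pelvis": [],
--         "Right Leg": [],
--         "Left Leg": [],
--         "Lumbar": [],
--         "Right Arm": [],
--         "Left Arm": [],
--         "Other": []
--     }
--
--     for col in columns:
--
--         if col == "time":
--             continue
--
--         if "pelvis" in col:
--             groups["Pelvis"].append(col)
--
--         elif col.endswith("_r") and any(x in col for x in ["hip", "knee", "ankle", "subtalar"]):
--             groups["Right Leg"].append(col)
--
--         elif col.endswith("_l") and any(x in col for x in ["hip", "knee", "ankle", "subtalar"]):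
--             groups["Left Leg"].append(col)
--
--         elif "lumbar" in col:
--             groups["Lumbar"].append(col)
--
--         elif col.endswith("_r") and any(x in col for x in ["arm", "elbow"]):
--             groups["Right Arm"].append(col)
--
--         elif col.endswith("_l") and any(x in col for x in ["arm", "elbow"]):
--             groups["Left Arm"].append(col)
--
--         else:
--             groups["Other"].append(col)
--
--     return groups
-- ===== SOURCE B (Python) =====
-- GROUP_RULES = [
--     ("Pelvis", lambda c: "pelvis" in c),
--     ("Right Leg", lambda c: c.endswith("_r") and any(x in c for x in ("hip", "knee", "ankle", "subtalar"))),
--     ("Left Leg", lambda c: c.endswith("_l") and any(x in c for x in ("hip", "knee", "ankle", "subtalar"))),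
--     ("Lumbar", lambda c: "lumbar" in c),
--     ("Right Arm", lambda c: c.endswith("_r") and any(x in c for x in ("arm", "elbow"))),
--     ("Left Arm", lambda c: c.endswith("_l") and any(x in c for x in ("arm", "elbow"))),
-- ]
--
--
-- def _classify(col):
--     return next((g for g, pred in GROUP_RULES if pred(col)), "Other")
--
--
-- def group_variables(columns):
--     names = [g for g, _ in GROUP_RULES] + ["Other"]
--     return {g: [c for c in columns if c != "time" and _classify(c) == g] for g in names}
-- ===== Notes on version B (the rewrite author's own statement) =====
-- stated objective: alternative
-- what changed: A makes one pass over the columns with an if/elif cascade appending into a mutable 7-bucket dict; B builds the dict by comprehension from a (group, predicate) rule table, classifying each column via first-matching rule and filtering the columns once per group.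
import Mathlib
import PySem

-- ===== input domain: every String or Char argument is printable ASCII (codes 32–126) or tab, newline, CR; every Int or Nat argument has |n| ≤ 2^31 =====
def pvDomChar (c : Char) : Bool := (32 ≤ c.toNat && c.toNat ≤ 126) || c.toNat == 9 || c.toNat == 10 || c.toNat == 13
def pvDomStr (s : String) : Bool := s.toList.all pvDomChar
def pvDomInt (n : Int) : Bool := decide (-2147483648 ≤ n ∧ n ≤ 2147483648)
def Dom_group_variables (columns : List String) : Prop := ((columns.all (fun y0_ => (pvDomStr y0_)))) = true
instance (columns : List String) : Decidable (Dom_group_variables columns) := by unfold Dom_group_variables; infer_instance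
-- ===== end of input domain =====

-- B replaces A's single-pass if/elif cascade with a rule-table classifier and per-group filters (objective: alternative decomposition, same cost class).

-- ===== PORT A =====
def gvStep (groups : PySem.Dict String (List String)) (col : String) : PySem.Dict String (List String) :=
  if col == "time" then groups
  else if PySem.Str.isIn "pelvis" col then groups.modify "Pelvis" [] (· ++ [col])
  else if PySem.Str.endswith col "_r" && (["hip", "knee", "ankle", "subtalar"].any fun x => PySem.Str.isIn x col) then
    groups.modify "Right Leg" [] (· ++ [col])
  else if PySem.Str.endswith col "_l" && (["hip", "knee", "ankle", "subtalar"].any fun x => PySem.Str.isIn x col) then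
    groups.modify "Left Leg" [] (· ++ [col])
  else if PySem.Str.isIn "lumbar" col then groups.modify "Lumbar" [] (· ++ [col])
  else if PySem.Str.endswith col "_r" && (["arm", "elbow"].any fun x => PySem.Str.isIn x col) then
    groups.modify "Right Arm" [] (· ++ [col])
  else if PySem.Str.endswith col "_l" && (["arm", "elbow"].any fun x => PySem.Str.isIn x col) then
    groups.modify "Left Arm" [] (· ++ [col])
  else groups.modify "Other" [] (· ++ [col])

def group_variables (columns : List String) : List (String × List String) :=
  (columns.foldl gvStep (PySem.Dict.ofList
    [("Pelvis", []), ("Right Leg", []), ("Left Leg", []), ("Lumbar", []),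
     ("Right Arm", []), ("Left Arm", []), ("Other", [])])).items

-- ===== PORT B =====
def gvRules : List (String × (String → Bool)) :=
  [("Pelvis", fun c => PySem.Str.isIn "pelvis" c),
   ("Right Leg", fun c => PySem.Str.endswith c "_r" && (["hip", "knee", "ankle", "subtalar"].any fun x => PySem.Str.isIn x c)),
   ("Left Leg", fun c => PySem.Str.endswith c "_l" && (["hip", "knee", "ankle", "subtalar"].any fun x => PySem.Str.isIn x c)),
   ("Lumbar", fun c => PySem.Str.isIn "lumbar" c),
   ("Right Arm", fun c => PySem.Str.endswith c "_r" && (["arm", "elbow"].any fun x => PySem.Str.isIn x c)),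
   ("Left Arm", fun c => PySem.Str.endswith c "_l" && (["arm", "elbow"].any fun x => PySem.Str.isIn x c))]

def gvClassify (col : String) : String :=
  ((gvRules.find? fun r => r.2 col).map Prod.fst).getD "Other"

def group_variables_alt (columns : List String) : List (String × List String) :=
  ((gvRules.map Prod.fst) ++ ["Other"]).map fun g =>
    (g, columns.filter fun c => c != "time" && gvClassify c == g)

-- ===== PRECONDITION & SPEC =====
def Spec_group_variables (columns : List String) (out : List (String × List String)) : Prop := out = group_variables_alt columns
instance (columns : List String) (out : List (String × List String)) : Decidable (Spec_group_variables columns out) := by unfold Spec_group_variables; infer_instance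

-- ===== CLAIM (what is proved, stated in full; the proofs are below) =====
def Claim_equal_group_variables : Prop := ∀ (columns : List String), Dom_group_variables columns → Spec_group_variables columns (group_variables columns)

-- ===== LEMMAS AND PROOFS =====

def gvBucket (g : String) (xs : List String) : List String :=
  xs.filter fun c => c != "time" && gvClassify c == g

lemma gv_main (xs : List String) : ∀ (p1 p2 p3 p4 p5 p6 p7 : List String),
    (xs.foldl gvStep (PySem.Dict.mk
      [("Pelvis", p1), ("Right Leg", p2), ("Left Leg", p3), ("Lumbar", p4),
       ("Right Arm", p5), ("Left Arm", p6), ("Other", p7)])).items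
    = [("Pelvis", p1 ++ gvBucket "Pelvis" xs), ("Right Leg", p2 ++ gvBucket "Right Leg" xs),
       ("Left Leg", p3 ++ gvBucket "Left Leg" xs), ("Lumbar", p4 ++ gvBucket "Lumbar" xs),
       ("Right Arm", p5 ++ gvBucket "Right Arm" xs), ("Left Arm", p6 ++ gvBucket "Left Arm" xs),
       ("Other", p7 ++ gvBucket "Other" xs)] := by
  induction xs with
  | nil => intro p1 p2 p3 p4 p5 p6 p7; simp [gvBucket]
  | cons x xs ih =>
    intro p1 p2 p3 p4 p5 p6 p7
    cases h1 : x == "time" with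
    | true =>
      have hx : x = "time" := by simpa using h1
      have step : gvStep (PySem.Dict.mk [("Pelvis", p1), ("Right Leg", p2), ("Left Leg", p3), ("Lumbar", p4), ("Right Arm", p5), ("Left Arm", p6), ("Other", p7)]) x = PySem.Dict.mk [("Pelvis", p1), ("Right Leg", p2), ("Left Leg", p3), ("Lumbar", p4), ("Right Arm", p5), ("Left Arm", p6), ("Other", p7)] := by
        simp only [gvStep, h1]
        simp
      rw [List.foldl_cons, step, ih]
      simp [gvBucket, hx]
    | false =>
      cases h2 : PySem.Str.isIn "pelvis" x with
      | true =>
        have hc : gvClassify x = "Pelvis" := by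
          simp only [gvClassify, gvRules, List.find?, h2]
          rfl
        have hx : ¬ x = "time" := by simpa using h1
        have step : gvStep (PySem.Dict.mk [("Pelvis", p1), ("Right Leg", p2), ("Left Leg", p3), ("Lumbar", p4), ("Right Arm", p5), ("Left Arm", p6), ("Other", p7)]) x = PySem.Dict.mk [("Pelvis", p1 ++ [x]), ("Right Leg", p2), ("Left Leg", p3), ("Lumbar", p4), ("Right Arm", p5), ("Left Arm", p6), ("Other", p7)] := by
          simp only [gvStep, h1, h2]
          simp [PySem.Dict.modify, PySem.Dict.insert, PySem.Dict.getD, PySem.Dict.get?]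
        rw [List.foldl_cons, step, ih]
        simp [gvBucket, hc, hx]
      | false =>
        cases h3 : PySem.Str.endswith x "_r" && (["hip", "knee", "ankle", "subtalar"].any fun y => PySem.Str.isIn y x) with
        | true =>
          have hc : gvClassify x = "Right Leg" := by
            simp only [gvClassify, gvRules, List.find?, h2, h3]
            rfl
          have hx : ¬ x = "time" := by simpa using h1
          have step : gvStep (PySem.Dict.mk [("Pelvis", p1), ("Right Leg", p2), ("Left Leg", p3), ("Lumbar", p4), ("Right Arm", p5), ("Left Arm", p6), ("Other", p7)]) x = PySem.Dict.mk [("Pelvis", p1), ("Right Leg", p2 ++ [x]), ("Left Leg", p3), ("Lumbar", p4), ("Right Arm", p5), ("Left Arm", p6), ("Other", p7)] := by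
            simp only [gvStep, h1, h2, h3]
            simp [PySem.Dict.modify, PySem.Dict.insert, PySem.Dict.getD, PySem.Dict.get?]
          rw [List.foldl_cons, step, ih]
          simp [gvBucket, hc, hx]
        | false =>
          cases h4 : PySem.Str.endswith x "_l" && (["hip", "knee", "ankle", "subtalar"].any fun y => PySem.Str.isIn y x) with
          | true =>
            have hc : gvClassify x = "Left Leg" := by
              simp only [gvClassify, gvRules, List.find?, h2, h3, h4]
              rfl
            have hx : ¬ x = "time" := by simpa using h1
            have step : gvStep (PySem.Dict.mk [("Pelvis", p1), ("Right Leg", p2), ("Left Leg", p3), ("Lumbar", p4), ("Right Arm", p5), ("Left Arm", p6), ("Other", p7)]) x = PySem.Dict.mk [("Pelvis", p1), ("Right Leg", p2), ("Left Leg", p3 ++ [x]), ("Lumbar", p4), ("Right Arm", p5), ("Left Arm", p6), ("Other", p7)] := by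
              simp only [gvStep, h1, h2, h3, h4]
              simp [PySem.Dict.modify, PySem.Dict.insert, PySem.Dict.getD, PySem.Dict.get?]
            rw [List.foldl_cons, step, ih]
            simp [gvBucket, hc, hx]
          | false =>
            cases h5 : PySem.Str.isIn "lumbar" x with
            | true =>
              have hc : gvClassify x = "Lumbar" := by
                simp only [gvClassify, gvRules, List.find?, h2, h3, h4, h5]
                rfl
              have hx : ¬ x = "time" := by simpa using h1
              have step : gvStep (PySem.Dict.mk [("Pelvis", p1), ("Right Leg", p2), ("Left Leg", p3), ("Lumbar", p4), ("Right Arm", p5), ("Left Arm", p6), ("Other", p7)]) x = PySem.Dict.mk [("Pelvis", p1), ("Right Leg", p2), ("Left Leg", p3), ("Lumbar", p4 ++ [x]), ("Right Arm", p5), ("Left Arm", p6), ("Other", p7)] := by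
                simp only [gvStep, h1, h2, h3, h4, h5]
                simp [PySem.Dict.modify, PySem.Dict.insert, PySem.Dict.getD, PySem.Dict.get?]
              rw [List.foldl_cons, step, ih]
              simp [gvBucket, hc, hx]
            | false =>
              cases h6 : PySem.Str.endswith x "_r" && (["arm", "elbow"].any fun y => PySem.Str.isIn y x) with
              | true =>
                have hc : gvClassify x = "Right Arm" := by
                  simp only [gvClassify, gvRules, List.find?, h2, h3, h4, h5, h6]
                  rfl
                have hx : ¬ x = "time" := by simpa using h1
                have step : gvStep (PySem.Dict.mk [("Pelvis", p1), ("Right Leg", p2), ("Left Leg", p3), ("Lumbar", p4), ("Right Arm", p5), ("Left Arm", p6), ("Other", p7)]) x = PySem.Dict.mk [("Pelvis", p1), ("Right Leg", p2), ("Left Leg", p3), ("Lumbar", p4), ("Right Arm", p5 ++ [x]), ("Left Arm", p6), ("Other", p7)] := by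
                  simp only [gvStep, h1, h2, h3, h4, h5, h6]
                  simp [PySem.Dict.modify, PySem.Dict.insert, PySem.Dict.getD, PySem.Dict.get?]
                rw [List.foldl_cons, step, ih]
                simp [gvBucket, hc, hx]
              | false =>
                cases h7 : PySem.Str.endswith x "_l" && (["arm", "elbow"].any fun y => PySem.Str.isIn y x) with
                | true =>
                  have hc : gvClassify x = "Left Arm" := by
                    simp only [gvClassify, gvRules, List.find?, h2, h3, h4, h5, h6, h7]
                    rfl
                  have hx : ¬ x = "time" := by simpa using h1
                  have step : gvStep (PySem.Dict.mk [("Pelvis", p1), ("Right Leg", p2), ("Left Leg", p3), ("Lumbar", p4), ("Right Arm", p5), ("Left Arm", p6), ("Other", p7)]) x = PySem.Dict.mk [("Pelvis", p1), ("Right Leg", p2), ("Left Leg", p3), ("Lumbar", p4), ("Right Arm", p5), ("Left Arm", p6 ++ [x]), ("Other", p7)] := by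
                    simp only [gvStep, h1, h2, h3, h4, h5, h6, h7]
                    simp [PySem.Dict.modify, PySem.Dict.insert, PySem.Dict.getD, PySem.Dict.get?]
                  rw [List.foldl_cons, step, ih]
                  simp [gvBucket, hc, hx]
                | false =>
                  have hc : gvClassify x = "Other" := by
                    simp only [gvClassify, gvRules, List.find?, h2, h3, h4, h5, h6, h7]
                    rfl
                  have hx : ¬ x = "time" := by simpa using h1
                  have step : gvStep (PySem.Dict.mk [("Pelvis", p1), ("Right Leg", p2), ("Left Leg", p3), ("Lumbar", p4), ("Right Arm", p5), ("Left Arm", p6), ("Other", p7)]) x = PySem.Dict.mk [("Pelvis", p1), ("Right Leg", p2), ("Left Leg", p3), ("Lumbar", p4), ("Right Arm", p5), ("Left Arm", p6), ("Other", p7 ++ [x])] := by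
                    simp only [gvStep, h1, h2, h3, h4, h5, h6, h7]
                    simp [PySem.Dict.modify, PySem.Dict.insert, PySem.Dict.getD, PySem.Dict.get?]
                  rw [List.foldl_cons, step, ih]
                  simp [gvBucket, hc, hx]


-- ===== VERDICT (by name: the statement is the Claim_ definition above) =====
theorem group_variables_spec : Claim_equal_group_variables := by
  intro columns _
  unfold Spec_group_variables group_variables group_variables_alt
  rw [show (PySem.Dict.ofList
    [("Pelvis", ([] : List String)), ("Right Leg", []), ("Left Leg", []), ("Lumbar", []),
     ("Right Arm", []), ("Left Arm", []), ("Other", [])]) = PySem.Dict.mk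
    [("Pelvis", []), ("Right Leg", []), ("Left Leg", []), ("Lumbar", []),
     ("Right Arm", []), ("Left Arm", []), ("Other", [])] from by decide]
  rw [gv_main]
  simp [gvRules, gvBucket]
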